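-- pv_equiv track=rewrite | github.com/zb-umkc/elic_dct | ELICUtilis/encoding/rle.py | exp_golomb_encode_signed
-- ===== SOURCE A (Python) =====
-- from collections import Counter
--
-- def exp_golomb_encode_signed(values):
--     """Version with lookup table for common values."""
--     if len(values) == 0:
--         return ""
--
--     # Build lookup table for values that appear frequently
--     value_counts = Counter(values)
--     common_values = set(val for val, count in value_counts.most_common(20) if -50 <= val <= 50)
--
--     # Pre-compute codes for common values
--     lookup = {}
--     for val in common_values:
--         if val <= 0:
--             xp = -2 * val
--         else:
--             xp = 2 * val - 1
--
--         x_plus_1 = int(xp) + 1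
--         bits_needed = x_plus_1.bit_length()
--         prefix_zeros = bits_needed - 1
--         lookup[val] = '0' * prefix_zeros + format(x_plus_1, f'0{bits_needed}b')
--
--     result_parts = []
--
--     for x in values:
--         if x in lookup:
--             result_parts.append(lookup[x])
--         else:
--             if x <= 0:
--                 xp = -2 * x
--             else:
--                 xp = 2 * x - 1
--
--             x_plus_1 = int(xp) + 1
--             bits_needed = x_plus_1.bit_length()
--             prefix_zeros = bits_needed - 1
--             result_parts.append('0' * prefix_zeros + format(x_plus_1, f'0{bits_needed}b'))
--
--     return ''.join(result_parts)
-- ===== SOURCE B (Python) =====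
-- def _eg(n):
--     # exp-Golomb codeword of n >= 1, built recursively from the halved value
--     if n == 1:
--         return '1'
--     return '0' + _eg(n // 2) + ('0' if n % 2 == 0 else '1')
--
--
-- def exp_golomb_encode_signed(values):
--     """Recursive-halving encoder: codewords are built by structural recursion
--     on the mapped value instead of bit_length()/format(); no lookup table."""
--     out = []
--     for x in values:
--         n = (-2 * int(x) if x <= 0 else 2 * int(x) - 1) + 1
--         out.append(_eg(n))
--     return ''.join(out)
-- ===== Notes on version B (the rewrite author's own statement) =====
-- stated objective: alternative
-- what changed: Dropped the Counter/most_common/lookup preprocessing entirely and replaced the bit_length()/format() codeword construction by a structural recursion on the mapped value n (code(1)='1', code(n)='0'+code(n//2)+last bit), emitted in a single pass.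
import Mathlib
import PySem

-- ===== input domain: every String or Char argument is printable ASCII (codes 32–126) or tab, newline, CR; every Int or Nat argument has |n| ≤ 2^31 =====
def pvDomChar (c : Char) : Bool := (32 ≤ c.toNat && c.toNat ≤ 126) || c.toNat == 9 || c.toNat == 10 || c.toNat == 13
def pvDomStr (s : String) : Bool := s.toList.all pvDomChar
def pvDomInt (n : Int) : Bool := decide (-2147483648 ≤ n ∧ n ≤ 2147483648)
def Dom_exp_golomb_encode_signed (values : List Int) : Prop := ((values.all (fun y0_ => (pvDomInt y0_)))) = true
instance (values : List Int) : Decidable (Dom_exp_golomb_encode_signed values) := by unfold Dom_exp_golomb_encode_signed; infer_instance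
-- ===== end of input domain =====

-- B drops A's Counter/most_common/lookup caching layer and builds each codeword by structural
-- recursion on the halved value instead of bit_length()/format(); same output, alternative algorithm.

-- ===== PORT A =====
-- the exp-Golomb code block A's source repeats verbatim (lookup build and else-branch);
-- format(n, f'0{b}b') ported as zero-pad of format(n,'b') — exact here since n ≥ 1
def pvCodeA (x : Int) : String :=
  let xp : Int := if x ≤ 0 then -2 * x else 2 * x - 1
  let x_plus_1 : Int := xp + 1
  let bits_needed : Nat := PySem.Int.bitLength x_plus_1
  let bin : List Char := PySem.Int.toBinChars x_plus_1
  String.ofList (List.replicate (bits_needed - 1) '0' ++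
             (List.replicate (bits_needed - bin.length) '0' ++ bin))

def exp_golomb_encode_signed (values : List Int) : String :=
  if values.length = 0 then "" else
  let value_counts := PySem.Dict.counter values
  let common_values : PySem.Set Int :=
    PySem.Set.ofList
      ((((PySem.List.sorted value_counts.items (fun kv => kv.2) true).take 20).filter
          (fun kv => decide (-50 ≤ kv.1) && decide (kv.1 ≤ 50))).map (·.1))
  -- lookup dict built by iterating the set; only looked up afterwards, so independent of set order
  let lookup : PySem.Dict Int String :=
    common_values.foldl (fun d val => d.insert val (pvCodeA val)) PySem.Dict.empty
  let result_parts : List String :=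
    values.foldl
      (fun acc x =>
        acc ++ [if lookup.contains x then (lookup.get? x).getD "" else pvCodeA x]) []
  PySem.Str.join "" result_parts

-- ===== PORT B =====
-- _eg from Source B: recursion on n // 2; fuel only makes the recursion total (n ≥ 1 at every call site)
def pvEgChars : Nat → Int → List Char
  | 0, _ => []
  | fuel+1, n =>
    if n = 1 then ['1']
    else '0' :: (pvEgChars fuel (PySem.Int.floordiv n 2) ++
                 [if PySem.Int.mod n 2 = 0 then '0' else '1'])

def pvEgB (x : Int) : String :=
  let n : Int := (if x ≤ 0 then -2 * x else 2 * x - 1) + 1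
  String.ofList (pvEgChars (PySem.Int.bitLength n + 1) n)

def exp_golomb_encode_signed_alt (values : List Int) : String :=
  PySem.Str.join "" (values.foldl (fun acc x => acc ++ [pvEgB x]) [])

-- ===== PRECONDITION & SPEC =====
def Spec_exp_golomb_encode_signed (values : List Int) (out : String) : Prop := out = exp_golomb_encode_signed_alt values
instance (values : List Int) (out : String) : Decidable (Spec_exp_golomb_encode_signed values out) := by unfold Spec_exp_golomb_encode_signed; infer_instance

-- ===== CLAIM (what is proved, stated in full; the proofs are below) =====
def Claim_equal_exp_golomb_encode_signed : Prop := ∀ (values : List Int), Dom_exp_golomb_encode_signed values → Spec_exp_golomb_encode_signed values (exp_golomb_encode_signed values)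

-- ===== LEMMAS AND PROOFS =====

-- toDigitsCore pulls its accumulator out as a suffix
lemma pv_tdc_acc (fuel : Nat) : ∀ (n : Nat) (ds : List Char),
    Nat.toDigitsCore 2 fuel n ds = Nat.toDigitsCore 2 fuel n [] ++ ds := by
  induction fuel with
  | zero => intro n ds; simp [Nat.toDigitsCore]
  | succ f ih =>
    intro n ds
    simp only [Nat.toDigitsCore]
    by_cases h : n / 2 = 0
    · simp [h]
    · simp only [if_neg h]
      rw [ih (n / 2) (_ :: ds), ih (n / 2) [_]]
      simp

-- toDigitsCore is fuel-independent once the fuel exceeds the argument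
lemma pv_tdc_fuel : ∀ (n f1 f2 : Nat), n < f1 → n < f2 →
    Nat.toDigitsCore 2 f1 n [] = Nat.toDigitsCore 2 f2 n [] := by
  intro n
  induction n using Nat.strong_induction_on with
  | _ n ih =>
    intro f1 f2 h1 h2
    obtain ⟨g1, rfl⟩ : ∃ g, f1 = g + 1 := ⟨f1 - 1, by omega⟩
    obtain ⟨g2, rfl⟩ : ∃ g, f2 = g + 1 := ⟨f2 - 1, by omega⟩
    simp only [Nat.toDigitsCore]
    by_cases h : n / 2 = 0
    · simp [h]
    · simp only [if_neg h]
      rw [pv_tdc_acc g1, pv_tdc_acc g2]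
      have hlt : n / 2 < n := by omega
      rw [ih (n / 2) hlt g1 g2 (by omega) (by omega)]

-- the recursion format(n,'b') satisfies
lemma pv_toDigits_rec (n : Nat) (h : 2 ≤ n) :
    Nat.toDigits 2 n = Nat.toDigits 2 (n / 2) ++ [Nat.digitChar (n % 2)] := by
  unfold Nat.toDigits
  conv_lhs => simp only [Nat.toDigitsCore]
  have h0 : ¬ n / 2 = 0 := by omega
  rw [if_neg h0, pv_tdc_acc, pv_tdc_fuel (n / 2) n (n / 2 + 1) (by omega) (by omega)]

-- format(n,'b') has exactly bit_length(n) digits for n ≥ 1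
lemma pv_len_toDigits : ∀ (m : Nat), 1 ≤ m →
    (Nat.toDigits 2 m).length = PySem.Int.bitLength (m : Int) := by
  intro m
  induction m using Nat.strong_induction_on with
  | _ m ih =>
    intro h1
    by_cases h2 : m = 1
    · subst h2; decide
    · rw [pv_toDigits_rec m (by omega), List.length_append,
          PySem.Int.bitLength_natCast (m := m) (show 0 < m by omega),
          ih (m / 2) (by omega) (by omega)]
      simp

-- bit_length is positive on positive input
lemma pv_bitLength_pos (m : Nat) (h : 1 ≤ m) : 1 ≤ PySem.Int.bitLength (m : Int) := by
  rw [PySem.Int.bitLength_natCast (m := m) (show 0 < m by omega)]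
  omega

-- B's recursive codeword = A's prefix-zeros + binary digits
lemma pv_eg_eq : ∀ (m : Nat), 1 ≤ m → ∀ (f : Nat), PySem.Int.bitLength (m : Int) ≤ f →
    pvEgChars f (m : Int) =
      List.replicate (PySem.Int.bitLength (m : Int) - 1) '0' ++ Nat.toDigits 2 m := by
  intro m
  induction m using Nat.strong_induction_on with
  | _ m ih =>
    intro h1 f hf
    have hblp := pv_bitLength_pos m h1
    obtain ⟨g, rfl⟩ : ∃ g, f = g + 1 := ⟨f - 1, by omega⟩
    by_cases h2 : m = 1
    · subst h2
      simp only [pvEgChars]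
      norm_num
      decide
    · have hm2 : 2 ≤ m := by omega
      have hne : (m : Int) ≠ 1 := by exact_mod_cast h2
      have hdiv : PySem.Int.floordiv (m : Int) 2 = ((m / 2 : Nat) : Int) := by
        exact_mod_cast PySem.Int.floordiv_natCast m 2
      have hmod : PySem.Int.mod (m : Int) 2 = ((m % 2 : Nat) : Int) := by
        exact_mod_cast PySem.Int.mod_natCast m 2
      simp only [pvEgChars, if_neg hne, hdiv, hmod]
      have hlt : m / 2 < m := by omega
      have h1' : 1 ≤ m / 2 := by omega
      have hbl2 : PySem.Int.bitLength ((m : Nat) : Int) = PySem.Int.bitLength ((m / 2 : Nat) : Int) + 1 :=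
        PySem.Int.bitLength_natCast (m := m) (show 0 < m by omega)
      have hle : PySem.Int.bitLength ((m / 2 : Nat) : Int) ≤ g := by omega
      rw [ih (m / 2) hlt h1' g hle,
          pv_toDigits_rec m hm2, PySem.Int.bitLength_natCast (m := m) (show 0 < m by omega)]
      have hbl := pv_bitLength_pos (m / 2) (by omega)
      obtain ⟨k, hk⟩ : ∃ k, PySem.Int.bitLength ((m / 2 : Nat) : Int) = k + 1 :=
        ⟨PySem.Int.bitLength ((m / 2 : Nat) : Int) - 1, by omega⟩
      rw [hk]
      have hbit : (if ((m % 2 : Nat) : Int) = 0 then '0' else '1') = Nat.digitChar (m % 2) := by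
        rcases Nat.mod_two_eq_zero_or_one m with h | h <;> rw [h] <;> decide
      rw [hbit]
      simp [List.replicate_succ]

-- per element, A's else-branch code equals B's recursive code
lemma pv_codeA_eq_egB (x : Int) : pvCodeA x = pvEgB x := by
  have hxp : 0 ≤ (if x ≤ 0 then -2 * x else 2 * x - 1) := by split_ifs with h <;> omega
  obtain ⟨m, hm1, hm⟩ :
      ∃ m : Nat, 1 ≤ m ∧ (if x ≤ 0 then -2 * x else 2 * x - 1) + 1 = (m : Int) :=
    ⟨((if x ≤ 0 then -2 * x else 2 * x - 1) + 1).toNat, by omega, by omega⟩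
  have hbin : PySem.Int.toBinChars (m : Int) = Nat.toDigits 2 m := by
    unfold PySem.Int.toBinChars
    rw [if_neg (by omega)]
    simp
  simp only [pvCodeA, pvEgB, hm]
  rw [hbin, pv_len_toDigits m hm1,
      pv_eg_eq m hm1 (PySem.Int.bitLength (m : Int) + 1) (by omega)]
  simp

-- every value ever stored in A's lookup is the code of its key
lemma pv_lookup_inv (l : List Int) (d : PySem.Dict Int String)
    (h : ∀ x r, d.get? x = some r → r = pvCodeA x) :
    ∀ x r, (l.foldl (fun d val => d.insert val (pvCodeA val)) d).get? x = some r → r = pvCodeA x := by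
  induction l generalizing d with
  | nil => exact h
  | cons a t ih =>
    intro x r
    simp only [List.foldl_cons]
    refine ih _ ?_ x r
    intro y s hy
    rw [PySem.Dict.get?_insert] at hy
    split at hy
    · cases hy; simp_all
    · exact h y s hy

-- A's per-element branch always yields the plain code
lemma pv_branch_eq (d : PySem.Dict Int String)
    (h : ∀ x r, d.get? x = some r → r = pvCodeA x) (x : Int) :
    (if d.contains x then (d.get? x).getD "" else pvCodeA x) = pvCodeA x := by
  by_cases hc : d.contains x = true
  · rw [if_pos hc]
    rw [PySem.Dict.contains_eq_isSome_get?] at hc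
    cases hg : d.get? x with
    | none => simp [hg] at hc
    | some r => simp [h x r hg]
  · simp [hc]

-- ===== VERDICT (by name: the statement is the Claim_ definition above) =====
theorem exp_golomb_encode_signed_spec : Claim_equal_exp_golomb_encode_signed := by
  intro values _
  unfold Spec_exp_golomb_encode_signed exp_golomb_encode_signed exp_golomb_encode_signed_alt
  by_cases hvs : values.length = 0
  · rw [if_pos hvs]
    rw [List.length_eq_zero_iff] at hvs
    subst hvs; rfl
  · rw [if_neg hvs]
    have hinv := pv_lookup_inv
      (PySem.Set.ofList
        ((((PySem.List.sorted (PySem.Dict.counter values).items (fun kv => kv.2) true).take 20).filter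
            (fun kv => decide (-50 ≤ kv.1) && decide (kv.1 ≤ 50))).map (·.1)))
      PySem.Dict.empty (by intro x r hr; simp [PySem.Dict.get?, PySem.Dict.empty] at hr)
    dsimp only
    rw [PySem.List.foldl_append_singleton_eq_map, PySem.List.foldl_append_singleton_eq_map]
    congr 1
    refine List.map_congr_left ?_
    intro x _
    rw [pv_branch_eq _ hinv x, pv_codeA_eq_egB x]
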